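-- pv_equiv track=rewrite | github.com/mawaha/AbleOscMcp | src/ableosc/theory.py | snap_to_scale
-- ===== SOURCE A (Python) =====
-- SCALES: dict[str, list[int]] = {
--     # Diatonic modes
--     "major":           [0, 2, 4, 5, 7, 9, 11],
--     "ionian":          [0, 2, 4, 5, 7, 9, 11],
--     "dorian":          [0, 2, 3, 5, 7, 9, 10],
--     "phrygian":        [0, 1, 3, 5, 7, 8, 10],
--     "lydian":          [0, 2, 4, 6, 7, 9, 11],
--     "mixolydian":      [0, 2, 4, 5, 7, 9, 10],
--     "aeolian":         [0, 2, 3, 5, 7, 8, 10],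
--     "minor":           [0, 2, 3, 5, 7, 8, 10],
--     "locrian":         [0, 1, 3, 5, 6, 8, 10],
--     # Minor variants
--     "harmonic_minor":  [0, 2, 3, 5, 7, 8, 11],
--     "melodic_minor":   [0, 2, 3, 5, 7, 9, 11],
--     # Pentatonics
--     "pentatonic_major": [0, 2, 4, 7, 9],
--     "pentatonic_minor": [0, 3, 5, 7, 10],
--     # Blues
--     "blues":           [0, 3, 5, 6, 7, 10],
--     "blues_major":     [0, 2, 3, 4, 7, 9],
--     # Symmetric
--     "whole_tone":      [0, 2, 4, 6, 8, 10],
--     "diminished":      [0, 2, 3, 5, 6, 8, 9, 11],   # whole-half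
--     "diminished_half": [0, 1, 3, 4, 6, 7, 9, 10],   # half-whole
--     "chromatic":       list(range(12)),
--     # Other
--     "phrygian_dominant": [0, 1, 4, 5, 7, 8, 10],
--     "hungarian_minor":   [0, 2, 3, 6, 7, 8, 11],
-- }
--
-- SCALE_ALIASES: dict[str, str] = {
--     "nat_minor": "minor",
--     "natural_minor": "minor",
--     "maj": "major",
--     "min": "minor",
--     "pent_major": "pentatonic_major",
--     "pent_minor": "pentatonic_minor",
-- }
--
-- def resolve_scale(name: str) -> list[int]:
--     """Return scale intervals for a name, raising ValueError if unknown."""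
--     key = name.lower().replace(" ", "_").replace("-", "_")
--     key = SCALE_ALIASES.get(key, key)
--     if key not in SCALES:
--         raise ValueError(
--             f"Unknown scale: {name!r}. Known scales: {', '.join(sorted(SCALES))}"
--         )
--     return SCALES[key]
--
-- def snap_to_scale(pitch: int, root_pc: int, scale_name: str) -> int:
--     """
--     Move a MIDI pitch to the nearest pitch in the given scale.
--
--     If the pitch is already in the scale it is returned unchanged.
--     Ties are broken upward.
--     """
--     intervals = resolve_scale(scale_name)
--     pcs = [(root_pc + i) % 12 for i in intervals]
--
--     pc = pitch % 12
--     if pc in pcs: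
--         return pitch
--
--     # Find nearest scale pitch class by chromatic distance
--     best_delta = None
--     for sp in pcs:
--         delta = sp - pc
--         # Wrap to [-6, 6]
--         if delta > 6:
--             delta -= 12
--         elif delta <= -6:
--             delta += 12
--         if best_delta is None or abs(delta) < abs(best_delta):
--             best_delta = delta
--         elif abs(delta) == abs(best_delta) and delta > best_delta:
--             best_delta = delta  # tie-break upward
--
--     return pitch + best_delta
-- ===== SOURCE B (Python) =====
-- # Bitmask-based snap: each scale is a 12-bit pitch-class mask (aliases merged in),
-- # and pitches are handled relative to the root, so no per-call pitch-class list is built.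
-- _MASKS: dict[str, int] = {
--     # bit i is set iff interval i belongs to the scale
--     "major": 2741, "ionian": 2741, "dorian": 1709, "phrygian": 1451,
--     "lydian": 2773, "mixolydian": 1717, "aeolian": 1453, "minor": 1453,
--     "locrian": 1387, "harmonic_minor": 2477, "melodic_minor": 2733,
--     "pentatonic_major": 661, "pentatonic_minor": 1193, "blues": 1257,
--     "blues_major": 669, "whole_tone": 1365, "diminished": 2925,
--     "diminished_half": 1755, "chromatic": 4095, "phrygian_dominant": 1459,
--     "hungarian_minor": 2509,
--     # aliases, merged directly
--     "nat_minor": 1453, "natural_minor": 1453, "maj": 2741, "min": 1453,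
--     "pent_major": 661, "pent_minor": 1193,
-- }
--
-- def snap_to_scale(pitch: int, root_pc: int, scale_name: str) -> int:
--     """Move a MIDI pitch to the nearest pitch in the given scale (ties upward)."""
--     key = scale_name.lower().replace(" ", "_").replace("-", "_")
--     if key not in _MASKS:
--         raise ValueError(f"Unknown scale: {scale_name!r}")
--     mask = _MASKS[key]
--     rel = (pitch - root_pc) % 12  # pitch class relative to the root
--     if mask >> rel & 1:
--         return pitch
--     for d in range(1, 7):
--         if mask >> (rel + d) % 12 & 1:
--             return pitch + d
--         if mask >> (rel - d) % 12 & 1: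
--             return pitch - d
--     return pitch  # unreachable: every scale contains its root
-- ===== Notes on version B (the rewrite author's own statement) =====
-- stated objective: alternative
-- what changed: Replaces A's pitch-class list construction and full best-delta/tie-break scan by a precomputed 12-bit mask per scale (aliases merged into one table) probed at the root-relative pitch class with an expanding-radius search (+1,-1,...,+6) that returns at the first set bit, making the upward tie-break implicit in the probe order.
import Mathlib
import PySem

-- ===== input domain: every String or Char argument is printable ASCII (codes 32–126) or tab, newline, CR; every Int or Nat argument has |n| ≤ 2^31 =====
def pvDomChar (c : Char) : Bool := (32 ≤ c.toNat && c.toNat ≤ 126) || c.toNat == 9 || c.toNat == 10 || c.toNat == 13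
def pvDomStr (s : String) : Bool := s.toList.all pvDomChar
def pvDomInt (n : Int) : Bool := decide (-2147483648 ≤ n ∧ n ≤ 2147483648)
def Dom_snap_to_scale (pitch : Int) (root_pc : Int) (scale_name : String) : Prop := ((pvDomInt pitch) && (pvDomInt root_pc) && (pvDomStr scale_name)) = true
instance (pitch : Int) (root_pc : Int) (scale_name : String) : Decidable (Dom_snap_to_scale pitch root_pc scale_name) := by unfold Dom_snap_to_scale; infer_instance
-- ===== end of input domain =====

-- B replaces A's per-call pitch-class list and best-delta/tie-break scan by a precomputed
-- 12-bit mask per scale (aliases merged into one table) probed at the root-relative pitch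
-- class with an expanding-radius search; objective: alternative. Where Python A raises
-- ValueError (unknown scale name), B raises too; those inputs are outside Pre_.

-- ===== PORT A =====
-- module constant SCALES of A's module
def pvSCALES : PySem.Dict String (List Int) := PySem.Dict.ofList [
  ("major",            [0, 2, 4, 5, 7, 9, 11]),
  ("ionian",           [0, 2, 4, 5, 7, 9, 11]),
  ("dorian",           [0, 2, 3, 5, 7, 9, 10]),
  ("phrygian",         [0, 1, 3, 5, 7, 8, 10]),
  ("lydian",           [0, 2, 4, 6, 7, 9, 11]),
  ("mixolydian",       [0, 2, 4, 5, 7, 9, 10]),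
  ("aeolian",          [0, 2, 3, 5, 7, 8, 10]),
  ("minor",            [0, 2, 3, 5, 7, 8, 10]),
  ("locrian",          [0, 1, 3, 5, 6, 8, 10]),
  ("harmonic_minor",   [0, 2, 3, 5, 7, 8, 11]),
  ("melodic_minor",    [0, 2, 3, 5, 7, 9, 11]),
  ("pentatonic_major", [0, 2, 4, 7, 9]),
  ("pentatonic_minor", [0, 3, 5, 7, 10]),
  ("blues",            [0, 3, 5, 6, 7, 10]),
  ("blues_major",      [0, 2, 3, 4, 7, 9]),
  ("whole_tone",       [0, 2, 4, 6, 8, 10]),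
  ("diminished",       [0, 2, 3, 5, 6, 8, 9, 11]),
  ("diminished_half",  [0, 1, 3, 4, 6, 7, 9, 10]),
  ("chromatic",        PySem.List.pyRange 0 12 1),
  ("phrygian_dominant",[0, 1, 4, 5, 7, 8, 10]),
  ("hungarian_minor",  [0, 2, 3, 6, 7, 8, 11])]

def pvSCALE_ALIASES : PySem.Dict String String := PySem.Dict.ofList [
  ("nat_minor", "minor"),
  ("natural_minor", "minor"),
  ("maj", "major"),
  ("min", "minor"),
  ("pent_major", "pentatonic_major"),
  ("pent_minor", "pentatonic_minor")]

-- resolve_scale: 'none' is the ValueError path (excluded by Pre_)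
def resolve_scale (name : String) : Option (List Int) :=
  let key := PySem.Str.replace (PySem.Str.replace (PySem.Str.lower name) " " "_") "-" "_"
  let key := pvSCALE_ALIASES.getD key key
  pvSCALES.get? key

-- the body of A's for-loop (named so the proofs stay tractable)
def stepA (pc : Int) (best : Option Int) (sp : Int) : Option Int :=
  let delta := sp - pc
  let delta := if delta > 6 then delta - 12
               else if delta ≤ -6 then delta + 12 else delta
  match best with
  | none => some delta
  | some b =>
    if |delta| < |b| then some delta
    else if |delta| = |b| ∧ delta > b then some delta
    else some b

def snap_to_scale (pitch : Int) (root_pc : Int) (scale_name : String) : Int :=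
  match resolve_scale scale_name with
  | none => 0   -- Python raises ValueError here; outside Pre_
  | some intervals =>
    let pcs := intervals.map (fun i => PySem.Int.mod (root_pc + i) 12)
    let pc := PySem.Int.mod pitch 12
    if pc ∈ pcs then pitch
    else pitch + (pcs.foldl (stepA pc) none).getD 0
      -- the fold yields 'some _' whenever pcs ≠ [] (Python: best_delta not None)

-- ===== PORT B =====
-- B's module constant _MASKS: 12-bit pitch-class masks, aliases merged in
def pvMASKS : PySem.Dict String Int := PySem.Dict.ofList [
  ("major", 2741), ("ionian", 2741), ("dorian", 1709), ("phrygian", 1451),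
  ("lydian", 2773), ("mixolydian", 1717), ("aeolian", 1453), ("minor", 1453),
  ("locrian", 1387), ("harmonic_minor", 2477), ("melodic_minor", 2733),
  ("pentatonic_major", 661), ("pentatonic_minor", 1193), ("blues", 1257),
  ("blues_major", 669), ("whole_tone", 1365), ("diminished", 2925),
  ("diminished_half", 1755), ("chromatic", 4095), ("phrygian_dominant", 1459),
  ("hungarian_minor", 2509),
  ("nat_minor", 1453), ("natural_minor", 1453), ("maj", 2741), ("min", 1453),
  ("pent_major", 661), ("pent_minor", 1193)]

-- 'mask >> i & 1' of Source B; exact for 0 ≤ i (every call passes some x % 12 ∈ [0,12))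
def bitTest (mask i : Int) : Bool :=
  PySem.Int.mod (PySem.Int.floordiv mask ((2 : Int) ^ i.toNat)) 2 == 1

-- Source B's for-loop over range(1, 7) with early returns (result relative to pitch)
def snapLoopB (mask rel : Int) : List Int → Int
  | [] => 0   -- the final 'return pitch' of Source B; unreachable: every scale contains its root
  | d :: ds =>
    if bitTest mask (PySem.Int.mod (rel + d) 12) then d
    else if bitTest mask (PySem.Int.mod (rel - d) 12) then -d
    else snapLoopB mask rel ds

def snap_to_scale_alt (pitch : Int) (root_pc : Int) (scale_name : String) : Int :=
  let key := PySem.Str.replace (PySem.Str.replace (PySem.Str.lower scale_name) " " "_") "-" "_"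
  match pvMASKS.get? key with
  | none => 0   -- Python raises ValueError here; outside Pre_
  | some mask =>
    let rel := PySem.Int.mod (pitch - root_pc) 12
    if bitTest mask rel then pitch
    else pitch + snapLoopB mask rel (PySem.List.pyRange 1 7 1)

-- ===== PRECONDITION & SPEC =====
-- the normalized names both programs accept (21 scales + 6 aliases)
def pvKnownKeys : List String :=
  ["major", "ionian", "dorian", "phrygian", "lydian", "mixolydian", "aeolian", "minor",
   "locrian", "harmonic_minor", "melodic_minor", "pentatonic_major", "pentatonic_minor",
   "blues", "blues_major", "whole_tone", "diminished", "diminished_half", "chromatic",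
   "phrygian_dominant", "hungarian_minor",
   "nat_minor", "natural_minor", "maj", "min", "pent_major", "pent_minor"]

-- Pre_ excludes exactly the scale names whose normalized form is not a known scale or alias:
-- there Python A (and Python B alike) raises ValueError.
def Pre_snap_to_scale (pitch : Int) (root_pc : Int) (scale_name : String) : Prop :=
  (PySem.Str.replace (PySem.Str.replace (PySem.Str.lower scale_name) " " "_") "-" "_") ∈ pvKnownKeys
instance (pitch : Int) (root_pc : Int) (scale_name : String) : Decidable (Pre_snap_to_scale pitch root_pc scale_name) := by unfold Pre_snap_to_scale; infer_instance

def pvWitness_snap_to_scale : Int × Int × String := (61, 2, "Pent Minor")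

def Spec_snap_to_scale (pitch : Int) (root_pc : Int) (scale_name : String) (out : Int) : Prop := out = snap_to_scale_alt pitch root_pc scale_name
instance (pitch : Int) (root_pc : Int) (scale_name : String) (out : Int) : Decidable (Spec_snap_to_scale pitch root_pc scale_name out) := by unfold Spec_snap_to_scale; infer_instance

-- ===== CLAIM (what is proved, stated in full; the proofs are below) =====
def Claim_equal_snap_to_scale : Prop := ∀ (pitch : Int) (root_pc : Int) (scale_name : String), Dom_snap_to_scale pitch root_pc scale_name → Pre_snap_to_scale pitch root_pc scale_name → Spec_snap_to_scale pitch root_pc scale_name (snap_to_scale pitch root_pc scale_name)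

-- ===== LEMMAS AND PROOFS =====

-- A's snap delta as a function of the pitch class and the pitch-class list
def deltaA (pc : Int) (pcs : List Int) : Int :=
  if pc ∈ pcs then 0
  else (pcs.foldl (stepA pc) none).getD 0

-- B's snap delta as a function of the root-relative pitch class and the mask
def deltaB (rel mask : Int) : Int :=
  if bitTest mask rel then 0
  else snapLoopB mask rel (PySem.List.pyRange 1 7 1)

lemma bodyA_eq (pitch pc : Int) (pcs : List Int) :
    (if pc ∈ pcs then pitch else pitch + (pcs.foldl (stepA pc) none).getD 0)
      = pitch + deltaA pc pcs := by
  unfold deltaA; split_ifs <;> simp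

lemma bodyB_eq (pitch rel mask : Int) :
    (if bitTest mask rel then pitch else pitch + snapLoopB mask rel (PySem.List.pyRange 1 7 1))
      = pitch + deltaB rel mask := by
  unfold deltaB; split_ifs <;> simp

-- the 21 (interval list, mask) pairs the two tables pair up
def pvPairs : List (List Int × Int) := [
  ([0, 2, 4, 5, 7, 9, 11], 2741), ([0, 2, 3, 5, 7, 9, 10], 1709),
  ([0, 1, 3, 5, 7, 8, 10], 1451), ([0, 2, 4, 6, 7, 9, 11], 2773),
  ([0, 2, 4, 5, 7, 9, 10], 1717), ([0, 2, 3, 5, 7, 8, 10], 1453),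
  ([0, 1, 3, 5, 6, 8, 10], 1387), ([0, 2, 3, 5, 7, 8, 11], 2477),
  ([0, 2, 3, 5, 7, 9, 11], 2733), ([0, 2, 4, 7, 9], 661),
  ([0, 3, 5, 7, 10], 1193), ([0, 3, 5, 6, 7, 10], 1257),
  ([0, 2, 3, 4, 7, 9], 669), ([0, 2, 4, 6, 8, 10], 1365),
  ([0, 2, 3, 5, 6, 8, 9, 11], 2925), ([0, 1, 3, 4, 6, 7, 9, 10], 1755),
  ([0, 1, 2, 3, 4, 5, 6, 7, 8, 9, 10, 11], 4095),
  ([0, 1, 4, 5, 7, 8, 10], 1459), ([0, 2, 3, 6, 7, 8, 11], 2509)]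

-- for each known key, A's resolution and B's mask lookup land on a matching pair
lemma tables_ok : (pvKnownKeys.all (fun k =>
    match pvSCALES.get? (pvSCALE_ALIASES.getD k k), pvMASKS.get? k with
    | some L, some m => decide ((L, m) ∈ pvPairs)
    | _, _ => false)) = true := by decide

-- the finite core: for every matched pair, root residue and pitch residue, the deltas agree
lemma core : ∀ p ∈ pvPairs, ∀ r ∈ PySem.List.pyRange 0 12 1, ∀ q ∈ PySem.List.pyRange 0 12 1,
    deltaA q (p.1.map (fun i => PySem.Int.mod (r + i) 12))
      = deltaB (PySem.Int.mod (q - r) 12) p.2 := by decide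

lemma mod_shift (root_pc i : Int) :
    PySem.Int.mod (root_pc + i) 12 = PySem.Int.mod (PySem.Int.mod root_pc 12 + i) 12 := by
  simp only [PySem.Int.mod_eq_emod_of_pos (show (0:Int) < 12 by norm_num)]
  omega

lemma rel_mod (pitch root_pc : Int) :
    PySem.Int.mod (pitch - root_pc) 12
      = PySem.Int.mod (PySem.Int.mod pitch 12 - PySem.Int.mod root_pc 12) 12 := by
  simp only [PySem.Int.mod_eq_emod_of_pos (show (0:Int) < 12 by norm_num)]
  omega

lemma mod12_mem (x : Int) : PySem.Int.mod x 12 ∈ PySem.List.pyRange 0 12 1 := by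
  rw [PySem.List.mem_pyRange_one]
  simp only [PySem.Int.mod_eq_emod_of_pos (show (0:Int) < 12 by norm_num)]
  omega

-- ===== VERDICT (by name: the statement is the Claim_ definition above) =====
theorem snap_to_scale_spec : Claim_equal_snap_to_scale := by
  intro pitch root_pc scale_name _hdom hpre
  unfold Spec_snap_to_scale snap_to_scale snap_to_scale_alt resolve_scale
  set k := PySem.Str.replace (PySem.Str.replace (PySem.Str.lower scale_name) " " "_") "-" "_" with hk
  have hall := List.all_eq_true.mp tables_ok k hpre
  cases hL : pvSCALES.get? (pvSCALE_ALIASES.getD k k) with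
  | none => rw [hL] at hall; cases (pvMASKS.get? k) <;> simp at hall
  | some L =>
    cases hM : pvMASKS.get? k with
    | none => rw [hL, hM] at hall; simp at hall
    | some m =>
      rw [hL, hM] at hall
      have hpair : (L, m) ∈ pvPairs := of_decide_eq_true hall
      simp only [hM]
      rw [bodyA_eq, bodyB_eq]
      have hmap : L.map (fun i => PySem.Int.mod (root_pc + i) 12)
          = L.map (fun i => PySem.Int.mod (PySem.Int.mod root_pc 12 + i) 12) :=
        List.map_congr_left (fun i _ => mod_shift root_pc i)
      rw [hmap, rel_mod]
      exact congrArg (pitch + ·)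
        (core (L, m) hpair (PySem.Int.mod root_pc 12) (mod12_mem root_pc)
          (PySem.Int.mod pitch 12) (mod12_mem pitch))
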